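-- pv_equiv track=rewrite | github.com/dk67604/provectus | find_max_time.py | check_valid_minute_format
-- ===== SOURCE A (Python) =====
-- def check_valid_minute_format(input_list,max_time):
--     flag=False
--     temp_val=input_list[0]
--     pos=-1
--     for j in range (0,len(input_list)):
--         if(0<=input_list[j]<=5):
--             if(temp_val>5):
--                 temp_val=input_list[j]
--                 pos = j
--             if(temp_val<=input_list[j]):
--                 temp_val=input_list[j]
--                 pos = j
--             flag=True
--     if(flag):
--         max_time+=":"+str(temp_val)
--         input_list.pop(pos)
--     return flag,input_list,max_time
-- ===== SOURCE B (Python) =====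
-- def check_valid_minute_format(input_list, max_time):
--     # bucket by value: last[v] = last index where v occurs (values 0..5 only)
--     last = [-1] * 6
--     for i, v in enumerate(input_list):
--         if 0 <= v <= 5:
--             last[v] = i
--     for v in range(5, -1, -1):
--         if last[v] != -1:
--             input_list.pop(last[v])
--             return True, input_list, max_time + ":" + str(v)
--     return False, input_list, max_time
-- ===== Notes on version B (the rewrite author's own statement) =====
-- stated objective: alternative
-- what changed: Replaces A's single-pass flag/temp/pos comparison state machine by value-bucketing: one pass records the last index of each value 0..5 in a fixed 6-slot table, then a countdown scan 5..0 picks the highest occupied bucket, which reproduces A's largest-value / latest-index choice without any pairwise comparisons.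
import Mathlib
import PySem

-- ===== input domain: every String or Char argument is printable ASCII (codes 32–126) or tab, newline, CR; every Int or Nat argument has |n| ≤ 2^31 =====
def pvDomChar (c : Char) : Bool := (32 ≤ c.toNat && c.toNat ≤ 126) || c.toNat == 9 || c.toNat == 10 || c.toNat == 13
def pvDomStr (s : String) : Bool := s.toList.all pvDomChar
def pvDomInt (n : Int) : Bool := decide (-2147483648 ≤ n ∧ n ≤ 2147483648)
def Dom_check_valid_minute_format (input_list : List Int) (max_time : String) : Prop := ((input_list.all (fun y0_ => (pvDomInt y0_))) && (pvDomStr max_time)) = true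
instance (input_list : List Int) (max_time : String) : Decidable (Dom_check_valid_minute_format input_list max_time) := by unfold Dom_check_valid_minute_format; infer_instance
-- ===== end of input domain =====

-- B replaces A's flag/temp/pos state machine by a 6-slot bucket of last indices per value, then a
-- countdown scan 5..0 (objective: alternative decomposition). Both Pythons pop the chosen index
-- from input_list in place; the equivalence proved is about the return value (the popped list is
-- part of that value, and both perform the same single pop).


-- ===== PORT A =====
-- loop body of A: state (flag, temp_val, pos); input_list[j] is in range for j ∈ range(0,len), so pyGetD is exact
def cvmfStepA (xs : List Int) (st : Bool × Int × Int) (j : Int) : Bool × Int × Int :=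
  let v := PySem.List.pyGetD xs j 0
  if 0 ≤ v ∧ v ≤ 5 then
    let s1 : Int × Int := if st.2.1 > 5 then (v, j) else (st.2.1, st.2.2)
    let s2 : Int × Int := if s1.1 ≤ v then (v, j) else s1
    (true, s2)
  else st

def check_valid_minute_format (input_list : List Int) (max_time : String) : Bool × List Int × String :=
  -- temp_val = input_list[0]: raises IndexError on []; Pre_ excludes the empty list, so pyGetD is exact here
  let st := (PySem.List.pyRange 0 (input_list.length : Int) 1).foldl (cvmfStepA input_list)
              (false, PySem.List.pyGetD input_list 0 0, (-1 : Int))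
  if st.1 then
    let mt := max_time ++ ":" ++ PySem.Int.toStr st.2.1
    match PySem.List.pop? input_list st.2.2 with   -- pos is always in range when flag is set
    | some (_, l) => (true, l, mt)
    | none => (true, input_list, mt)               -- unreachable under Pre_
  else (st.1, input_list, max_time)

-- ===== PORT B =====
-- loop body of B's first pass: last[v] = i for valid v (0 ≤ v ≤ 5 guards the index, so pySetD is exact)
def cvmfBStep (b : List Int) (p : Int × Int) : List Int :=
  if 0 ≤ p.2 ∧ p.2 ≤ 5 then PySem.List.pySetD b p.2 p.1 else b

-- B's second pass: first v in the countdown list with last[v] != -1 (early return)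
def cvmfPick (b : List Int) : List Int → Option Int
  | [] => none
  | v :: rest => if PySem.List.pyGetD b v 0 ≠ -1 then some v else cvmfPick b rest

def check_valid_minute_format_alt (input_list : List Int) (max_time : String) : Bool × List Int × String :=
  let last := (PySem.List.enumerate input_list 0).foldl cvmfBStep [-1, -1, -1, -1, -1, -1]
  match cvmfPick last (PySem.List.pyRange 5 (-1) (-1)) with
  | some v =>
    match PySem.List.pop? input_list (PySem.List.pyGetD last v 0) with  -- a recorded index is in range
    | some (_, l) => (true, l, max_time ++ ":" ++ PySem.Int.toStr v)
    | none => (true, input_list, max_time ++ ":" ++ PySem.Int.toStr v)  -- unreachable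
  | none => (false, input_list, max_time)

-- ===== PRECONDITION & SPEC =====
-- A reads input_list[0] before the loop, so it raises IndexError on the empty list; everything else is admitted.
def Pre_check_valid_minute_format (input_list : List Int) (max_time : String) : Prop := input_list ≠ []
instance (input_list : List Int) (max_time : String) : Decidable (Pre_check_valid_minute_format input_list max_time) := by unfold Pre_check_valid_minute_format; infer_instance
def pvWitness_check_valid_minute_format : List Int × String := ([3, 7, 3, 1], "12")

def Spec_check_valid_minute_format (input_list : List Int) (max_time : String) (out : Bool × List Int × String) : Prop := out = check_valid_minute_format_alt input_list max_time
instance (input_list : List Int) (max_time : String) (out : Bool × List Int × String) : Decidable (Spec_check_valid_minute_format input_list max_time out) := by unfold Spec_check_valid_minute_format; infer_instance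

-- ===== CLAIM (what is proved, stated in full; the proofs are below) =====
def Claim_equal_check_valid_minute_format : Prop := ∀ (input_list : List Int) (max_time : String), Dom_check_valid_minute_format input_list max_time → Pre_check_valid_minute_format input_list max_time → Spec_check_valid_minute_format input_list max_time (check_valid_minute_format input_list max_time)

-- ===== LEMMAS AND PROOFS =====

-- A's loop body as a step on (index, value) pairs
def cvmfStepP (st : Bool × Int × Int) (p : Int × Int) : Bool × Int × Int :=
  if 0 ≤ p.2 ∧ p.2 ≤ 5 then
    let s1 : Int × Int := if st.2.1 > 5 then (p.2, p.1) else (st.2.1, st.2.2)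
    let s2 : Int × Int := if s1.1 ≤ p.2 then (p.2, p.1) else s1
    (true, s2)
  else st

-- the coupling invariant between A's state and B's bucket
def cvmfInv (st : Bool × Int × Int) (b : List Int) : Prop :=
  b.length = 6 ∧
  (if st.1 then
     0 ≤ st.2.1 ∧ st.2.1 ≤ 5 ∧ 0 ≤ st.2.2 ∧ PySem.List.pyGetD b st.2.1 0 = st.2.2 ∧
       ∀ v : Int, st.2.1 < v → v ≤ 5 → PySem.List.pyGetD b v 0 = -1
   else (st.2.1 < 0 ∨ 5 < st.2.1) ∧ ∀ v : Int, 0 ≤ v → v ≤ 5 → PySem.List.pyGetD b v 0 = -1)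

theorem cvmfGetSet (b : List Int) (v w j : Int) (hb : b.length = 6)
    (hv : 0 ≤ v) (hv5 : v ≤ 5) (hw : 0 ≤ w) (hw5 : w ≤ 5) :
    PySem.List.pyGetD (PySem.List.pySetD b v j) w 0
      = if w = v then j else PySem.List.pyGetD b w 0 := by
  rw [PySem.List.pySetD_of_nonneg b j hv]
  rw [PySem.List.pyGetD_eq_getElem (b.set v.toNat j) 0 hw (by simp [hb]; omega),
      PySem.List.pyGetD_eq_getElem b 0 hw (by simp [hb]; omega)]
  rw [List.getElem_set]
  by_cases h : w = v
  · subst h; simp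
  · have : v.toNat ≠ w.toNat := by omega
    simp [this, h]

theorem cvmfLenBStep (b : List Int) (p : Int × Int) :
    (cvmfBStep b p).length = b.length := by
  unfold cvmfBStep
  split_ifs with h
  · exact PySem.List.length_pySetD b p.2 p.1
  · rfl

theorem cvmfInv_step (st : Bool × Int × Int) (b : List Int) (j v : Int)
    (hj : 0 ≤ j) (h : cvmfInv st b) :
    cvmfInv (cvmfStepP st (j, v)) (cvmfBStep b (j, v)) := by
  obtain ⟨hb, hst⟩ := h
  by_cases hv : 0 ≤ v ∧ v ≤ 5
  · have hb' : (cvmfBStep b (j, v)).length = 6 := by rw [cvmfLenBStep, hb]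
    have hget : ∀ w : Int, 0 ≤ w → w ≤ 5 →
        PySem.List.pyGetD (cvmfBStep b (j, v)) w 0
          = if w = v then j else PySem.List.pyGetD b w 0 := by
      intro w hw hw5
      simp only [cvmfBStep, hv, and_self, if_true]
      exact cvmfGetSet b v w j hb hv.1 hv.2 hw hw5
    cases hflag : st.1 with
    | true =>
      rw [hflag] at hst; simp only [if_true] at hst
      obtain ⟨hm0, hm5, hq0, hbm, hrest⟩ := hst
      by_cases hle : st.2.1 ≤ v
      · have hstep : cvmfStepP st (j, v) = (true, v, j) := by
          simp only [cvmfStepP, hv, and_self, if_true]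
          have : ¬ (st.2.1 > 5) := by omega
          simp [this, hle]
        rw [hstep]
        refine ⟨hb', ?_⟩
        simp only [if_true]
        refine ⟨hv.1, hv.2, hj, ?_, ?_⟩
        · rw [hget v hv.1 hv.2]; simp
        · intro w hw hw5
          rw [hget w (by omega) hw5]
          have : w ≠ v := by omega
          simp [this]
          exact hrest w (by omega) hw5
      · have hstep : cvmfStepP st (j, v) = (st.1, st.2.1, st.2.2) := by
          simp only [cvmfStepP, hv, and_self, if_true]
          have h1 : ¬ (st.2.1 > 5) := by omega
          simp [h1, hle, hflag]
        rw [hstep]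
        refine ⟨hb', ?_⟩
        simp only [hflag, if_true]
        refine ⟨hm0, hm5, hq0, ?_, ?_⟩
        · rw [hget st.2.1 hm0 hm5]
          have : st.2.1 ≠ v := by omega
          simp [this, hbm]
        · intro w hw hw5
          rw [hget w (by omega) hw5]
          have : w ≠ v := by omega
          simp [this]
          exact hrest w hw hw5
    | false =>
      rw [hflag] at hst; simp only [Bool.false_eq_true, if_false] at hst
      obtain ⟨hout, hall⟩ := hst
      have hstep : cvmfStepP st (j, v) = (true, v, j) := by
        simp only [cvmfStepP, hv, and_self, if_true]
        rcases hout with h | h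
        · have h5 : ¬ (st.2.1 > 5) := by omega
          have hle : st.2.1 ≤ v := by omega
          simp [h5, hle]
        · have h5 : st.2.1 > 5 := by omega
          simp [h5]
      rw [hstep]
      refine ⟨hb', ?_⟩
      simp only [if_true]
      refine ⟨hv.1, hv.2, hj, ?_, ?_⟩
      · rw [hget v hv.1 hv.2]; simp
      · intro w hw hw5
        rw [hget w (by omega) hw5]
        have : w ≠ v := by omega
        simp [this]
        exact hall w (by omega) hw5
  · have hstep : cvmfStepP st (j, v) = st := by simp [cvmfStepP, hv]
    have hbs : cvmfBStep b (j, v) = b := by simp [cvmfBStep, hv]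
    rw [hstep, hbs]; exact ⟨hb, hst⟩

theorem cvmfInv_fold (L : List (Int × Int)) (st : Bool × Int × Int) (b : List Int)
    (hL : ∀ p ∈ L, 0 ≤ p.1) (h : cvmfInv st b) :
    cvmfInv (L.foldl cvmfStepP st) (L.foldl cvmfBStep b) := by
  induction L generalizing st b with
  | nil => exact h
  | cons p L ih =>
    obtain ⟨j, v⟩ := p
    rw [List.foldl_cons, List.foldl_cons]
    exact ih _ _ (fun r hr => hL r (List.mem_cons_of_mem _ hr))
      (cvmfInv_step st b j v (hL (j, v) List.mem_cons_self) h)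

theorem cvmfRangeDown : PySem.List.pyRange 5 (-1) (-1) = [5, 4, 3, 2, 1, 0] := by decide

theorem cvmfPick_some (b : List Int) (m q : Int) (h : cvmfInv (true, m, q) b) :
    cvmfPick b (PySem.List.pyRange 5 (-1) (-1)) = some m ∧ PySem.List.pyGetD b m 0 = q := by
  obtain ⟨hb, h⟩ := h
  simp only [if_true] at h
  obtain ⟨hm0, hm5, hq0, hbm, hrest⟩ := h
  have hq : PySem.List.pyGetD b m 0 ≠ -1 := by rw [hbm]; omega
  rw [cvmfRangeDown]
  refine ⟨?_, hbm⟩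
  interval_cases m
  · simp [cvmfPick, hrest 5 (by omega) (by omega), hrest 4 (by omega) (by omega),
      hrest 3 (by omega) (by omega), hrest 2 (by omega) (by omega),
      hrest 1 (by omega) (by omega), hq]
  · simp [cvmfPick, hrest 5 (by omega) (by omega), hrest 4 (by omega) (by omega),
      hrest 3 (by omega) (by omega), hrest 2 (by omega) (by omega), hq]
  · simp [cvmfPick, hrest 5 (by omega) (by omega), hrest 4 (by omega) (by omega),
      hrest 3 (by omega) (by omega), hq]
  · simp [cvmfPick, hrest 5 (by omega) (by omega), hrest 4 (by omega) (by omega), hq]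
  · simp [cvmfPick, hrest 5 (by omega) (by omega), hq]
  · simp [cvmfPick, hq]

theorem cvmfPick_none (b : List Int) (t p : Int) (h : cvmfInv (false, t, p) b) :
    cvmfPick b (PySem.List.pyRange 5 (-1) (-1)) = none := by
  obtain ⟨hb, h⟩ := h
  simp only [Bool.false_eq_true, if_false] at h
  obtain ⟨_, hall⟩ := h
  rw [cvmfRangeDown]
  simp only [cvmfPick]
  rw [hall 5 (by omega) (by omega), hall 4 (by omega) (by omega),
      hall 3 (by omega) (by omega), hall 2 (by omega) (by omega),
      hall 1 (by omega) (by omega), hall 0 (by omega) (by omega)]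
  simp

theorem cvmfInitBucket : ∀ w : Int, 0 ≤ w → w ≤ 5 →
    PySem.List.pyGetD ([-1, -1, -1, -1, -1, -1] : List Int) w 0 = -1 := by
  intro w h1 h2
  interval_cases w <;> rfl

-- ===== VERDICT (by name: the statement is the Claim_ definition above) =====
theorem check_valid_minute_format_spec : Claim_equal_check_valid_minute_format := by
  intro xs mt _ hpre
  unfold Spec_check_valid_minute_format check_valid_minute_format check_valid_minute_format_alt
  cases xs with
  | nil => exact absurd rfl hpre
  | cons x xs' =>
    -- A's fold over range(0, len) with pyGetD is the fold of cvmfStepP over enumerate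
    have hA : (PySem.List.pyRange 0 ((x :: xs').length : Int) 1).foldl (cvmfStepA (x :: xs'))
        (false, PySem.List.pyGetD (x :: xs') 0 0, (-1 : Int))
        = (PySem.List.enumerate (x :: xs') 0).foldl cvmfStepP
            (false, PySem.List.pyGetD (x :: xs') 0 0, (-1 : Int)) := by
      rw [PySem.List.enumerate_eq_map_pyRange (x :: xs') 0, List.foldl_map]
      rfl
    rw [hA]
    rw [PySem.List.enumerate_cons, List.foldl_cons, List.foldl_cons,
        PySem.List.pyGetD_zero_cons]
    simp only [zero_add]
    have hge : ∀ p ∈ PySem.List.enumerate xs' 1, (0 : Int) ≤ p.1 := by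
      intro p hp
      obtain ⟨k, hk, rfl⟩ := (PySem.List.mem_enumerate_iff xs' 1 p).mp hp
      simp; omega
    have hinv1 : cvmfInv (cvmfStepP (false, x, -1) ((0 : Int), x))
        (cvmfBStep [-1, -1, -1, -1, -1, -1] ((0 : Int), x)) := by
      by_cases hvx : 0 ≤ x ∧ x ≤ 5
      · have hstep : cvmfStepP (false, x, -1) ((0 : Int), x) = (true, x, 0) := by
          simp only [cvmfStepP, hvx, and_self, if_true]
          have : ¬ (x > 5) := by omega
          simp [this]
        have hbs : cvmfBStep [-1, -1, -1, -1, -1, -1] ((0 : Int), x)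
            = PySem.List.pySetD [-1, -1, -1, -1, -1, -1] x 0 := by
          simp [cvmfBStep, hvx]
        rw [hstep, hbs]
        refine ⟨PySem.List.length_pySetD _ _ _, ?_⟩
        simp only [if_true]
        refine ⟨hvx.1, hvx.2, le_rfl, ?_, ?_⟩
        · rw [cvmfGetSet _ x x 0 rfl hvx.1 hvx.2 hvx.1 hvx.2]; simp
        · intro w hw hw5
          rw [cvmfGetSet _ x w 0 rfl hvx.1 hvx.2 (by omega) hw5]
          have : w ≠ x := by omega
          simp [this]
          exact cvmfInitBucket w (by omega) hw5
      · have hstep : cvmfStepP (false, x, -1) ((0 : Int), x) = (false, x, -1) := by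
          simp [cvmfStepP, hvx]
        have hbs : cvmfBStep [-1, -1, -1, -1, -1, -1] ((0 : Int), x)
            = [-1, -1, -1, -1, -1, -1] := by
          simp [cvmfBStep, hvx]
        rw [hstep, hbs]
        exact ⟨rfl, by
          simp only [Bool.false_eq_true, if_false]
          exact ⟨by omega, cvmfInitBucket⟩⟩
    have hinv := cvmfInv_fold (PySem.List.enumerate xs' 1) _ _ hge hinv1
    revert hinv
    generalize (PySem.List.enumerate xs' 1).foldl cvmfStepP
        (cvmfStepP (false, x, -1) ((0 : Int), x)) = st
    generalize (PySem.List.enumerate xs' 1).foldl cvmfBStep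
        (cvmfBStep [-1, -1, -1, -1, -1, -1] ((0 : Int), x)) = b
    intro hinv
    obtain ⟨flag, m, q⟩ := st
    cases flag with
    | false =>
      rw [cvmfPick_none b m q hinv]
      simp
    | true =>
      obtain ⟨hpick, hgq⟩ := cvmfPick_some b m q hinv
      simp only [hpick]
      rw [hgq]
      rw [if_pos trivial]
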